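-- pv_equiv track=rewrite | github.com/DipperChen2007/Autistic_enchancer | 2017/J4/J4_2.py | Favourite_Times
-- ===== SOURCE A (Python) =====
-- def check_if_favourite(lst):
--     if lst[0] == 0:
--         if lst[1] - lst[2] == lst[2] - lst[3]:
--             return True
--         else:
--             return False
--     else:
--         if lst[0] - lst[1] == lst[1] - lst[2] and lst[1] - lst[2] == lst[2] - lst[3]:
--             return True
--         else:
--             return False
--
-- def Favourite_Times (n):
--     answer = 0
--     day = n // 720
--     if day == 0:
--         day = day
--     elif day > 0:
--         n = n - day * 720
--         answer += 31 * day
--     start_point = [1,2,0,0]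
--     while n > 0:
--         start_point[-1] += 1
--         if start_point[-1] == 10:   #[1,2,5,10]
--             start_point[2] += 1
--             start_point[-1] = 0     #[1,2,6,0]
--         elif start_point[0] == 0 and start_point[1] == 10: #[0,10,0,0]
--             start_point[0] = 1
--             start_point[1] = 0    #[1,0,0,0]
--         elif start_point[2] == 6:   #[1,2,6,0]
--             start_point[1] += 1
--             start_point[2] = 0      #[1,3,0,0]
--         elif start_point[0] == 1 and start_point[1] == 3: #[1,3,0,0]
--             start_point[0] = 0
--             start_point[1] = 1     #[0,1,0,0]
--         if check_if_favourite(start_point):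
--             answer += 1
--         n -= 1
--     return answer
-- ===== SOURCE B (Python) =====
-- def _favourite(d0, d1, d2, d3):
--     if d0 == 0:
--         return d1 - d2 == d2 - d3
--     return d0 - d1 == d1 - d2 and d1 - d2 == d2 - d3
--
-- def _digits(i):
--     # display digits of a 12-hour clock i minutes after 12:00
--     h = (12 + i // 60 - 1) % 12 + 1
--     m = i % 60
--     return (h // 10, h % 10, m // 10, m % 10)
--
-- def Favourite_Times(n):
--     if n <= 0:
--         return 0
--     q, r = divmod(n, 720)
--     return 31 * q + sum(1 for i in range(1, r + 1) if _favourite(*_digits(i)))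
-- ===== Notes on version B (the rewrite author's own statement) =====
-- stated objective: simpler
-- what changed: B replaces A's step-by-step mutation of a four-digit list (with its elif rollover chain) by computing each offset's clock digits directly with arithmetic: after the same whole-day reduction via divmod it counts the remaining offsets whose display digits satisfy the favourite predicate.
import Mathlib
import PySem

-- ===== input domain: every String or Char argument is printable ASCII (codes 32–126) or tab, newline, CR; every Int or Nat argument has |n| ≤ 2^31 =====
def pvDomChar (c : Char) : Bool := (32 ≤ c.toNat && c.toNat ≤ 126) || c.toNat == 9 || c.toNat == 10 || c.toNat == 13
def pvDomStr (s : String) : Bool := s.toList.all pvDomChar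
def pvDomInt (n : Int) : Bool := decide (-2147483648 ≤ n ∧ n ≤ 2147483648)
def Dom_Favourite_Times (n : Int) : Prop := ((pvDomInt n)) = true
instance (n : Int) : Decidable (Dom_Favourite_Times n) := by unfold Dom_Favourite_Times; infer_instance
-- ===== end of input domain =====

-- B computes each offset's clock digits directly by arithmetic instead of A's stepwise
-- mutation of a digit list (objective: simpler decomposition; no speed claim).

-- ===== PORT A =====
-- check_if_favourite(lst) on the 4-element digit list, as four Int arguments
def pvCheckFav (a b c d : Int) : Bool :=
  if a = 0 then
    (if b - c = c - d then true else false)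
  else
    (if a - b = b - c ∧ b - c = c - d then true else false)

-- the loop body's mutation of start_point: the '+= 1' on the last cell, then the if/elif chain
def pvStep (s0 s1 s2 s3 : Int) : Int × Int × Int × Int :=
  let t3 := s3 + 1
  if t3 = 10 then (s0, s1, s2 + 1, (0:Int))
  else if s0 = 0 ∧ s1 = 10 then ((1:Int), (0:Int), s2, t3)
  else if s2 = 6 then (s0, s1 + 1, (0:Int), t3)
  else if s0 = 1 ∧ s1 = 3 then ((0:Int), (1:Int), s2, t3)
  else (s0, s1, s2, t3)

-- 'while n > 0: …; n -= 1' runs exactly n.toNat times; structural recursion on that count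
def pvLoopA : Nat → Int → Int → Int → Int → Int → Int
  | 0, _, _, _, _, answer => answer
  | Nat.succ k, s0, s1, s2, s3, answer =>
    let st := pvStep s0 s1 s2 s3
    let answer' := if pvCheckFav st.1 st.2.1 st.2.2.1 st.2.2.2 then answer + 1 else answer
    pvLoopA k st.1 st.2.1 st.2.2.1 st.2.2.2 answer'

def Favourite_Times (n : Int) : Int :=
  let answer : Int := 0
  let day := PySem.Int.floordiv n 720
  if day = 0 then pvLoopA n.toNat 1 2 0 0 answer
  else if 0 < day then pvLoopA (n - day * 720).toNat 1 2 0 0 (answer + 31 * day)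
  else pvLoopA n.toNat 1 2 0 0 answer

-- ===== PORT B =====
def pvFavB (d : Int × Int × Int × Int) : Bool :=
  if d.1 = 0 then decide (d.2.1 - d.2.2.1 = d.2.2.1 - d.2.2.2)
  else decide (d.1 - d.2.1 = d.2.1 - d.2.2.1 ∧ d.2.1 - d.2.2.1 = d.2.2.1 - d.2.2.2)

-- display digits of a 12-hour clock i minutes after 12:00
def pvDigits (i : Int) : Int × Int × Int × Int :=
  let h := PySem.Int.mod (12 + PySem.Int.floordiv i 60 - 1) 12 + 1
  let m := PySem.Int.mod i 60
  (PySem.Int.floordiv h 10, PySem.Int.mod h 10, PySem.Int.floordiv m 10, PySem.Int.mod m 10)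

def Favourite_Times_alt (n : Int) : Int :=
  if n ≤ 0 then 0
  else
    let q := PySem.Int.floordiv n 720
    let r := PySem.Int.mod n 720
    31 * q + ((PySem.List.pyRange 1 (r + 1) 1).countP (fun i => pvFavB (pvDigits i)) : Nat)

-- ===== PRECONDITION & SPEC =====
def Spec_Favourite_Times (n : Int) (out : Int) : Prop := out = Favourite_Times_alt n
instance (n : Int) (out : Int) : Decidable (Spec_Favourite_Times n out) := by unfold Spec_Favourite_Times; infer_instance

-- ===== CLAIM =====
def Claim_equal_Favourite_Times : Prop := ∀ (n : Int), Dom_Favourite_Times n → Spec_Favourite_Times n (Favourite_Times n)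

-- ===== LEMMAS AND PROOFS =====
set_option maxRecDepth 16000

def pvCountB (r : Int) : Int :=
  ((PySem.List.pyRange 1 (r + 1) 1).countP (fun i => pvFavB (pvDigits i)) : Nat)

lemma pvLoopA_shift (fuel : Nat) : ∀ (s0 s1 s2 s3 ans : Int),
    pvLoopA fuel s0 s1 s2 s3 ans = ans + pvLoopA fuel s0 s1 s2 s3 0 := by
  induction fuel with
  | zero => intro s0 s1 s2 s3 ans; simp [pvLoopA]
  | succ k ih =>
    intro s0 s1 s2 s3 ans
    rw [pvLoopA, pvLoopA]
    obtain ⟨a, b, c, d⟩ := pvStep s0 s1 s2 s3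
    by_cases hc : pvCheckFav a b c d
    · simp only [hc, if_pos]
      rw [ih a b c d (ans + 1), ih a b c d (0 + 1)]
      ring
    · simp only [hc, if_neg, Bool.false_eq_true, not_false_iff]
      rw [ih a b c d ans]

-- A's machine state after k loop steps
def pvD : Nat → Int × Int × Int × Int
  | 0 => (1, 2, 0, 0)
  | k + 1 => pvStep (pvD k).1 (pvD k).2.1 (pvD k).2.2.1 (pvD k).2.2.2

-- on each of the 720 reachable states, A's check agrees with B's predicate on B's digits
lemma pvCheckD : ∀ k : Fin 720,
    pvCheckFav (pvD (k + 1)).1 (pvD (k + 1)).2.1 (pvD (k + 1)).2.2.1 (pvD (k + 1)).2.2.2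
      = pvFavB (pvDigits ((k : Int) + 1)) := by
  decide

lemma pvLoop_count : ∀ (m j : Nat), j + m ≤ 720 →
    pvLoopA m (pvD j).1 (pvD j).2.1 (pvD j).2.2.1 (pvD j).2.2.2 0
      = ((PySem.List.pyRange ((j : Int) + 1) ((j : Int) + (m : Int) + 1) 1).countP
          (fun i => pvFavB (pvDigits i)) : Nat) := by
  intro m
  induction m with
  | zero =>
    intro j hj
    rw [PySem.List.pyRange_one_eq_nil (by push_cast; omega)]
    simp [pvLoopA]
  | succ m ih =>
    intro j hj
    rw [pvLoopA]
    have hstep : pvStep (pvD j).1 (pvD j).2.1 (pvD j).2.2.1 (pvD j).2.2.2 = pvD (j + 1) := rfl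
    rw [hstep]
    rw [pvLoopA_shift m (pvD (j+1)).1 (pvD (j+1)).2.1 (pvD (j+1)).2.2.1 (pvD (j+1)).2.2.2]
    have hrng : PySem.List.pyRange ((j : Int) + 1) ((j : Int) + ((m : Int) + 1) + 1) 1
        = ((j : Int) + 1) :: PySem.List.pyRange ((j : Int) + 1 + 1) ((j : Int) + ((m : Int) + 1) + 1) 1 :=
      PySem.List.pyRange_one_cons (by omega)
    have hih := ih (j + 1) (by omega)
    push_cast at hih ⊢
    rw [hrng, List.countP_cons]
    rw [show ((j:Int) + 1 + 1) = ((j:Int) + 2) by ring] at *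
    rw [hih]
    have hchk := pvCheckD ⟨j, by omega⟩
    rw [hchk]
    by_cases hc : pvFavB (pvDigits ((j:Int) + 1)) = true
    · simp [hc]; ring_nf
    · simp [hc]; ring_nf

theorem Favourite_Times_spec : Claim_equal_Favourite_Times := by
  intro n _
  unfold Spec_Favourite_Times Favourite_Times Favourite_Times_alt
  dsimp only
  by_cases hn : n ≤ 0
  · have hday : ¬ 0 < PySem.Int.floordiv n 720 := by
      intro h
      have := (PySem.Int.le_floordiv_iff_mul_le (a := n) (b := 720) (q := 1) (by norm_num)).mp (by omega)
      omega
    have ht : n.toNat = 0 := by omega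
    rw [if_pos hn]
    by_cases h0 : PySem.Int.floordiv n 720 = 0
    · rw [if_pos h0, ht]; rfl
    · rw [if_neg h0, if_neg hday, ht]; rfl
  · replace hn : 0 < n := by omega
    have hq0 : 0 ≤ PySem.Int.floordiv n 720 :=
      (PySem.Int.le_floordiv_iff_mul_le (a := n) (b := 720) (q := 0) (by norm_num)).mpr (by omega)
    have hmod : PySem.Int.mod n 720 = n % 720 := PySem.Int.mod_eq_emod_of_pos (by norm_num)
    have hrlo : 0 ≤ PySem.Int.mod n 720 := by rw [hmod]; exact Int.emod_nonneg n (by norm_num)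
    have hrhi : PySem.Int.mod n 720 < 720 := by rw [hmod]; exact Int.emod_lt_of_pos n (by norm_num)
    have hsum : PySem.Int.floordiv n 720 * 720 + PySem.Int.mod n 720 = n :=
      PySem.Int.floordiv_mul_add_mod n 720
    set q := PySem.Int.floordiv n 720 with hqdef
    set r := PySem.Int.mod n 720 with hrdef
    have hcore : pvLoopA r.toNat 1 2 0 0 0 = pvCountB r := by
      have h := pvLoop_count r.toNat 0 (by omega)
      unfold pvCountB
      simpa [pvD, Int.toNat_of_nonneg hrlo] using h
    rw [if_neg (by omega : ¬ n ≤ 0)]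
    by_cases hq : q = 0
    · have hnr : n = r := by omega
      rw [if_pos hq, hnr, hcore]
      simp [pvCountB, hq]
    · rw [if_neg hq, if_pos (by omega : 0 < q)]
      have hrw : n - q * 720 = r := by omega
      rw [hrw, pvLoopA_shift r.toNat 1 2 0 0 (0 + 31 * q), hcore]
      simp only [pvCountB]
      ring
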